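-- pv_equiv track=rewrite | github.com/jguida941/voiceterm | dev/scripts/checks/bundle_registry_dry/analysis.py | _used_composition_layers
-- ===== SOURCE A (Python) =====
-- def _uses_composition_layer(
--     bundle_commands: tuple[str, ...],
--     layer_commands: tuple[str, ...],
-- ) -> bool:
--     if len(layer_commands) > len(bundle_commands):
--         return False
--
--     window = len(layer_commands)
--     for index in range(len(bundle_commands) - window + 1):
--         if bundle_commands[index : index + window] == layer_commands:
--             return True
--     return False
--
-- def _used_composition_layers(
--     bundles: dict[str, tuple[str, ...]],
--     declared_layers: list[tuple[str, tuple[str, ...]]],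
-- ) -> list[str]:
--     used_layers: list[str] = []
--     for name, layer_commands in declared_layers:
--         reuse_count = sum(
--             1
--             for bundle_commands in bundles.values()
--             if _uses_composition_layer(bundle_commands, layer_commands)
--         )
--         if reuse_count >= 2:
--             used_layers.append(name)
--     return used_layers
-- ===== SOURCE B (Python) =====
-- def _used_composition_layers(
--     bundles: dict[str, tuple[str, ...]],
--     declared_layers: list[tuple[str, tuple[str, ...]]],
-- ) -> list[str]:
--     # Hash-index approach: for each bundle, collect the set of its contiguous
--     # windows whose length is the length of some declared layer, then count in
--     # one dict how many bundles contain each window; each layer is a single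
--     # O(1) lookup afterwards.
--     lengths = {len(layer_commands) for _name, layer_commands in declared_layers}
--     counts: dict[tuple[str, ...], int] = {}
--     for bundle_commands in bundles.values():
--         seen = set()
--         for m in lengths:
--             for i in range(len(bundle_commands) - m + 1):
--                 seen.add(bundle_commands[i : i + m])
--         for window in seen:
--             counts[window] = counts.get(window, 0) + 1
--     return [
--         name
--         for name, layer_commands in declared_layers
--         if counts.get(layer_commands, 0) >= 2
--     ]
-- ===== Notes on version B (the rewrite author's own statement) =====
-- stated objective: faster
-- what changed: Instead of scanning every bundle's windows once per layer, B builds a single hash index over the bundles (a dict counting in how many bundles each window of a relevant length occurs) and answers each layer by one O(1) dictionary lookup.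
import Mathlib
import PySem

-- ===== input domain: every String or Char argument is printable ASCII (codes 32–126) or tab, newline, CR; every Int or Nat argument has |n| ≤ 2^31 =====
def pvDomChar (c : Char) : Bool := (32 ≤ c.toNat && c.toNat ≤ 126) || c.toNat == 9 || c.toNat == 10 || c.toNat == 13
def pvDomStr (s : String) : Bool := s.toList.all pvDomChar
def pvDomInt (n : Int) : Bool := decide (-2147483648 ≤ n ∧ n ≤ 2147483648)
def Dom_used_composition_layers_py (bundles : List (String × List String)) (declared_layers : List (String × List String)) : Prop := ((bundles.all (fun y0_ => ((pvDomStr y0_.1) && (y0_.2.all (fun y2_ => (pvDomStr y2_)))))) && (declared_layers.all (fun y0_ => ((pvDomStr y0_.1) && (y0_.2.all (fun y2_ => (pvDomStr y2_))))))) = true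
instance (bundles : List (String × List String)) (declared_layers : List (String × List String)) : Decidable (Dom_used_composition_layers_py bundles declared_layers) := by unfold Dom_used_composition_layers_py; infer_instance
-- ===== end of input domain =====

-- B replaces A's per-layer × per-bundle window scan by a hash index built once over the
-- bundles (a dict counting, for every window whose length is some layer's length, in how
-- many bundles it occurs), so each layer becomes a single dictionary lookup (measured faster in a timing run).

-- ===== PORT A =====
-- _uses_composition_layer: guard on lengths, then scan every window by index and compare the slice
def usesCompositionLayer (bundle_commands layer_commands : List String) : Bool :=
  if layer_commands.length > bundle_commands.length then false
  else
    let window : Int := (layer_commands.length : Int)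
    (PySem.List.pyRange 0 ((bundle_commands.length : Int) - window + 1) 1).any
      (fun index => PySem.List.slice bundle_commands (some index) (some (index + window)) == layer_commands)

def used_composition_layers_py (bundles : List (String × List String)) (declared_layers : List (String × List String)) : List String :=
  declared_layers.foldl
    (fun used_layers nl =>
      let reuse_count : Int :=
        ((((PySem.Dict.ofList bundles).values.filter
            (fun bundle_commands => usesCompositionLayer bundle_commands nl.2)).map
          (fun _ => (1 : Int))).sum)
      if 2 ≤ reuse_count then used_layers ++ [nl.1] else used_layers)
    []

-- ===== PORT B =====
-- the set of windows of a bundle whose length belongs to `lengths`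
def bundleWindows (bundle_commands : List String) (lengths : PySem.Set Int) : PySem.Set (List String) :=
  lengths.foldl
    (fun seen m =>
      (PySem.List.pyRange 0 ((bundle_commands.length : Int) - m + 1) 1).foldl
        (fun seen i => PySem.Set.add seen (PySem.List.slice bundle_commands (some i) (some (i + m))))
        seen)
    PySem.Set.empty

-- counts[w] = number of bundles whose window set contains w
def windowCounts (vals : List (List String)) (lengths : PySem.Set Int) : PySem.Dict (List String) Int :=
  vals.foldl
    (fun counts bundle_commands =>
      (bundleWindows bundle_commands lengths).foldl
        (fun d w => d.modify w 0 (fun x => x + 1))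
        counts)
    PySem.Dict.empty

def used_composition_layers_py_alt (bundles : List (String × List String)) (declared_layers : List (String × List String)) : List String :=
  let lengths : PySem.Set Int :=
    PySem.Set.ofList (declared_layers.map (fun nl => (nl.2.length : Int)))
  let counts := windowCounts ((PySem.Dict.ofList bundles).values) lengths
  (declared_layers.filter (fun nl => decide (2 ≤ counts.getD nl.2 0))).map (fun nl => nl.1)

-- ===== PRECONDITION & SPEC =====
def Spec_used_composition_layers_py (bundles : List (String × List String)) (declared_layers : List (String × List String)) (out : List String) : Prop := out = used_composition_layers_py_alt bundles declared_layers
instance (bundles : List (String × List String)) (declared_layers : List (String × List String)) (out : List String) : Decidable (Spec_used_composition_layers_py bundles declared_layers out) := by unfold Spec_used_composition_layers_py; infer_instance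

-- ===== CLAIM (what is proved, stated in full; the proofs are below) =====
def Claim_equal_used_composition_layers_py : Prop := ∀ (bundles : List (String × List String)) (declared_layers : List (String × List String)), Dom_used_composition_layers_py bundles declared_layers → Spec_used_composition_layers_py bundles declared_layers (used_composition_layers_py bundles declared_layers)

-- ===== LEMMAS AND PROOFS =====

-- membership in the window set of one bundle
theorem mem_bundleWindows (bc : List String) (lengths : PySem.Set Int) (w : List String) :
    w ∈ bundleWindows bc lengths ↔
      ∃ m ∈ lengths, ∃ i ∈ PySem.List.pyRange 0 ((bc.length : Int) - m + 1) 1,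
        w = PySem.List.slice bc (some i) (some (i + m)) := by
  unfold bundleWindows
  have main : ∀ (L : List Int) (s : PySem.Set (List String)),
      w ∈ L.foldl
        (fun seen m =>
          (PySem.List.pyRange 0 ((bc.length : Int) - m + 1) 1).foldl
            (fun seen i => PySem.Set.add seen (PySem.List.slice bc (some i) (some (i + m)))) seen) s ↔
      w ∈ s ∨ ∃ m ∈ L, ∃ i ∈ PySem.List.pyRange 0 ((bc.length : Int) - m + 1) 1,
        w = PySem.List.slice bc (some i) (some (i + m)) := by
    intro L
    induction L with
    | nil => simp
    | cons m L ih =>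
      intro s
      simp only [List.foldl_cons, ih, PySem.Set.mem_foldl_add]
      constructor
      · rintro ((h | ⟨i, hi, hw⟩) | ⟨m', hm', rest⟩)
        · exact Or.inl h
        · exact Or.inr ⟨m, List.mem_cons_self .., i, hi, hw⟩
        · exact Or.inr ⟨m', List.mem_cons_of_mem _ hm', rest⟩
      · rintro (h | ⟨m', hm', i, hi, hw⟩)
        · exact Or.inl (Or.inl h)
        · rcases List.mem_cons.mp hm' with rfl | hm'
          · exact Or.inl (Or.inr ⟨i, hi, hw⟩)
          · exact Or.inr ⟨m', hm', i, hi, hw⟩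
  simpa using main lengths PySem.Set.empty

theorem nodup_foldl_add {α β : Type} [BEq α] [LawfulBEq α] (l : List β) (f : β → α)
    (s : PySem.Set α) (h : s.Nodup) : (l.foldl (fun s b => PySem.Set.add s (f b)) s).Nodup := by
  induction l generalizing s with
  | nil => exact h
  | cons b l ih =>
    simp only [List.foldl_cons]
    exact ih _ (PySem.Set.nodup_add s (f b) h)

theorem nodup_bundleWindows (bc : List String) (lengths : PySem.Set Int) :
    (bundleWindows bc lengths).Nodup := by
  unfold bundleWindows
  have main : ∀ (L : List Int) (s : PySem.Set (List String)), s.Nodup →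
      (L.foldl
        (fun seen m =>
          (PySem.List.pyRange 0 ((bc.length : Int) - m + 1) 1).foldl
            (fun seen i => PySem.Set.add seen (PySem.List.slice bc (some i) (some (i + m)))) seen) s).Nodup := by
    intro L
    induction L with
    | nil => exact fun s h => h
    | cons m L ih => exact fun s h => ih _ (nodup_foldl_add _ _ _ h)
  exact main lengths PySem.Set.empty List.nodup_nil

-- the key equivalence: a layer's commands lie in the window set iff A's scan finds them
theorem mem_windows_iff_uses (bc lc : List String) (lengths : PySem.Set Int)
    (hpos : ∀ m ∈ lengths, 0 ≤ m) (hl : (lc.length : Int) ∈ lengths) :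
    lc ∈ bundleWindows bc lengths ↔ usesCompositionLayer bc lc = true := by
  rw [mem_bundleWindows]
  constructor
  · rintro ⟨m, hm, i, hi, hw⟩
    obtain ⟨hi0, hilt⟩ := PySem.List.mem_pyRange_one.mp hi
    have hm0 : 0 ≤ m := hpos m hm
    have him : i + m ≤ (bc.length : Int) := by omega
    rw [PySem.List.slice_toNat bc hi0 (by omega)] at hw
    have hlen : lc.length = m.toNat := by
      rw [hw]
      rw [List.length_take, List.length_drop]
      omega
    have hmeq : (lc.length : Int) = m := by omega
    unfold usesCompositionLayer
    rw [if_neg (by omega)]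
    rw [List.any_eq_true]
    refine ⟨i, by rw [hmeq]; exact hi, ?_⟩
    rw [beq_iff_eq, hmeq, PySem.List.slice_toNat bc hi0 (by omega), hw]
  · intro h
    unfold usesCompositionLayer at h
    by_cases hg : lc.length > bc.length
    · rw [if_pos hg] at h; exact absurd h (by simp)
    · rw [if_neg hg, List.any_eq_true] at h
      obtain ⟨i, hi, hbeq⟩ := h
      exact ⟨(lc.length : Int), hl, i, hi, (beq_iff_eq.mp hbeq).symm⟩

-- the dict built by B counts, for each key, the bundles whose window set contains it
theorem getD_windowCounts (vals : List (List String)) (lengths : PySem.Set Int) (lc : List String) :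
    (windowCounts vals lengths).getD lc 0 =
      (vals.countP (fun bc => decide (lc ∈ bundleWindows bc lengths)) : Int) := by
  unfold windowCounts
  have main : ∀ (vs : List (List String)) (d : PySem.Dict (List String) Int),
      (vs.foldl
        (fun counts bc =>
          (bundleWindows bc lengths).foldl (fun d w => d.modify w 0 (fun x => x + 1)) counts) d).getD lc 0
      = d.getD lc 0 + (vs.countP (fun bc => decide (lc ∈ bundleWindows bc lengths)) : Int) := by
    intro vs
    induction vs with
    | nil => simp
    | cons bc vs ih =>
      intro d
      rw [List.foldl_cons, ih, PySem.Dict.getD_foldl_modify_add_one]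
      have hcount : List.count lc (bundleWindows bc lengths) =
          if lc ∈ bundleWindows bc lengths then 1 else 0 := by
        by_cases hmem : lc ∈ bundleWindows bc lengths
        · rw [if_pos hmem]
          exact List.count_eq_one_of_mem (nodup_bundleWindows bc lengths) hmem
        · rw [if_neg hmem]
          exact List.count_eq_zero_of_not_mem hmem
      rw [List.countP_cons, hcount]
      by_cases hmem : lc ∈ bundleWindows bc lengths
      · simp [hmem]; ring
      · simp [hmem]
  rw [main vals PySem.Dict.empty]
  simp

-- ===== VERDICT (by name: the statement is the Claim_ definition above) =====
theorem used_composition_layers_py_spec : Claim_equal_used_composition_layers_py := by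
  intro bundles declared_layers _
  unfold Spec_used_composition_layers_py used_composition_layers_py used_composition_layers_py_alt
  set vals := (PySem.Dict.ofList bundles).values with hvals
  set lengths : PySem.Set Int :=
    PySem.Set.ofList (declared_layers.map (fun nl => (nl.2.length : Int))) with hlengths
  have hpos : ∀ m ∈ lengths, 0 ≤ m := by
    intro m hm
    rw [hlengths, PySem.Set.mem_ofList] at hm
    obtain ⟨nl, _, rfl⟩ := List.mem_map.mp hm
    positivity
  rw [PySem.List.foldl_congr_mem declared_layers _
    (fun used_layers nl =>
      if (fun nl : String × List String =>
          decide (2 ≤ (windowCounts vals lengths).getD nl.2 0)) nl = true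
      then used_layers ++ [nl.1] else used_layers) []
    ?_]
  · rw [PySem.List.foldl_append_if]
    simp
  · intro acc nl hnl
    have hl : ((nl.2.length : Int)) ∈ lengths := by
      rw [hlengths, PySem.Set.mem_ofList]
      exact List.mem_map.mpr ⟨nl, hnl, rfl⟩
    have hcond : ((vals.filter (fun bc => usesCompositionLayer bc nl.2)).map
        (fun _ => (1 : Int))).sum = (windowCounts vals lengths).getD nl.2 0 := by
      rw [getD_windowCounts]
      simp only [List.map_const', List.sum_replicate, nsmul_eq_mul, mul_one,
        ← List.countP_eq_length_filter]
      have hcp : vals.countP (fun bc => usesCompositionLayer bc nl.2) =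
          vals.countP (fun bc => decide (nl.2 ∈ bundleWindows bc lengths)) := by
        refine List.countP_congr (fun bc _ => ?_)
        simp only [decide_eq_true_eq]
        exact (mem_windows_iff_uses bc nl.2 lengths hpos hl).symm
      rw [hcp]
    simp only [hcond, decide_eq_true_eq]
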